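-- pv_equiv track=rewrite | github.com/ajakaiye33/pythonic_daily_capsules | apythonicworkout_book/matrix_det.py | ispp
-- ===== SOURCE A (Python) =====
-- def ispp(val):
--     goo = []
--     uper = range(1, val)
--     base = range(1, val)
--     for i in uper:
--         for j in base:
--             if j**i == val:
--                 goo.append([j, i])
--     return goo
-- ===== SOURCE B (Python) =====
-- def ispp(val):
--     # For each exponent i with 2**i <= val, binary-search the integer i-th root
--     # and keep it only when it is exact: O(log^2 val) root tests vs A's O(val^2) scan.
--     res = []
--     i = 2
--     while 2 ** i <= val:
--         lo, hi = 1, val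
--         while lo < hi:
--             mid = (lo + hi) // 2
--             if mid ** i < val:
--                 lo = mid + 1
--             else:
--                 hi = mid
--         if lo ** i == val:
--             res.append([lo, i])
--         i += 1
--     return res
-- ===== Notes on version B (the rewrite author's own statement) =====
-- stated objective: faster
-- what changed: Replaces A's O(val^2) double scan over all base/exponent pairs by iterating exponents i only while 2**i <= val and binary-searching the integer i-th root for each, keeping it only when exact.
import Mathlib
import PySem

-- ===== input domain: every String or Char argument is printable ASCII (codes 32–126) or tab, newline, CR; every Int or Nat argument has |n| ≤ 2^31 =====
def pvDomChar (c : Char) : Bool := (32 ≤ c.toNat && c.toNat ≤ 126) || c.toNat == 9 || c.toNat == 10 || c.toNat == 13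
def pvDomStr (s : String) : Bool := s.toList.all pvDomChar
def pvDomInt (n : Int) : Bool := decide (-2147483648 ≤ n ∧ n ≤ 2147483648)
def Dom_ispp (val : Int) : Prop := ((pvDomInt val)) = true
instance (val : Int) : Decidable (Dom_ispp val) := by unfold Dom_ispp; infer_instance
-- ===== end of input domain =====

-- B iterates exponents i while 2^i ≤ val and binary-searches the integer i-th root
-- for each, instead of A's double scan over all bases and exponents (objective: faster).

-- ===== PORT A =====
-- for i in range(1, val): for j in range(1, val): if j**i == val: goo.append([j, i])
def ispp (val : Int) : List (List Int) :=
  (PySem.List.pyRange 1 val 1).foldl (fun goo i =>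
    (PySem.List.pyRange 1 val 1).foldl (fun goo j =>
      if j ^ i.toNat = val then goo ++ [[j, i]] else goo) goo) []

-- ===== PORT B =====
-- inner while-loop of Source B: binary search for the least lo in [1, val] with lo^n >= val
def isppRoot (val : Int) (n : Nat) (lo hi : Int) : Int :=
  if h : lo < hi then
    if (PySem.Int.floordiv (lo + hi) 2) ^ n < val then
      isppRoot val n (PySem.Int.floordiv (lo + hi) 2 + 1) hi
    else
      isppRoot val n lo (PySem.Int.floordiv (lo + hi) 2)
  else lo
termination_by (hi - lo).toNat
decreasing_by
  · have hb := PySem.Int.floordiv_two_mid_bounds (le_of_lt h)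
    omega
  · have hb := PySem.Int.floordiv_two_mid_bounds (le_of_lt h)
    have hlt : PySem.Int.floordiv (lo + hi) 2 < hi :=
      (PySem.Int.floordiv_lt_iff_lt_mul (by norm_num)).mpr (by omega)
    omega

-- outer while-loop of Source B: i = 2, 3, … while 2**i <= val
def isppGo (val : Int) (i : Nat) : List (List Int) :=
  if h : (2 : Int) ^ i ≤ val then
    (if (isppRoot val i 1 val) ^ i = val then [[isppRoot val i 1 val, (i : Int)]] else [])
      ++ isppGo val (i + 1)
  else []
termination_by (val + 1 - 2 ^ i).toNat
decreasing_by
  have hp : (0 : Int) < 2 ^ i := by positivity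
  have h2 : (2 : Int) ^ (i + 1) = 2 * 2 ^ i := by ring
  omega

def ispp_alt (val : Int) : List (List Int) := isppGo val 2

-- ===== PRECONDITION & SPEC =====
def Spec_ispp (val : Int) (out : List (List Int)) : Prop := out = ispp_alt val
instance (val : Int) (out : List (List Int)) : Decidable (Spec_ispp val out) := by unfold Spec_ispp; infer_instance

-- ===== CLAIM (what is proved, stated in full; the proofs are below) =====
def Claim_equal_ispp : Prop := ∀ (val : Int), Dom_ispp val → Spec_ispp val (ispp val)

-- ===== LEMMAS AND PROOFS =====

-- the contribution of one exponent i in A's nested loop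
def isppF (val i : Int) : List (List Int) :=
  ((PySem.List.pyRange 1 val 1).filter (fun j => decide (j ^ i.toNat = val))).map (fun j => [j, i])

lemma ispp_eq_flatMap (val : Int) :
    ispp val = (PySem.List.pyRange 1 val 1).flatMap (isppF val) := by
  unfold ispp
  have hin : ∀ (acc : List (List Int)) (i : Int),
      (PySem.List.pyRange 1 val 1).foldl
        (fun goo j => if j ^ i.toNat = val then goo ++ [[j, i]] else goo) acc
        = acc ++ isppF val i := by
    intro acc i
    have h := PySem.List.foldl_append_if (fun j => decide (j ^ i.toNat = val))
      (fun j => [j, i]) (PySem.List.pyRange 1 val 1) acc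
    simpa [isppF] using h
  rw [show (fun (goo : List (List Int)) (i : Int) =>
        (PySem.List.pyRange 1 val 1).foldl
          (fun goo j => if j ^ i.toNat = val then goo ++ [[j, i]] else goo) goo)
      = (fun goo i => goo ++ isppF val i) from funext fun goo => funext fun i => hin goo i]
  simpa using PySem.List.foldl_append_eq_flatMap (isppF val) (PySem.List.pyRange 1 val 1) []

lemma isppF_eq_nil (val i : Int) (h1 : 1 ≤ i)
    (h : ¬ (2 ≤ i ∧ (2 : Int) ^ i.toNat ≤ val)) : isppF val i = [] := by
  unfold isppF
  rw [List.filter_eq_nil_iff.mpr, List.map_nil]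
  intro j hj
  have hjr := (PySem.List.mem_pyRange_one).mp hj
  simp only [decide_eq_true_eq]
  intro hpow
  by_cases hi1 : i = 1
  · subst hi1; simp at hpow; omega
  · have h2i : 2 ≤ i := by omega
    have hgt : ¬ (2 : Int) ^ i.toNat ≤ val := fun hc => h ⟨h2i, hc⟩
    push Not at hgt
    by_cases hj1 : j = 1
    · subst hj1; simp at hpow
      have : (1 : Int) < 2 ^ i.toNat := by
        have : (2 : Int) ^ 0 < 2 ^ i.toNat :=
          pow_lt_pow_right₀ (by norm_num) (by omega)
        simpa using this
      omega
    · have h2j : 2 ≤ j := by omega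
      have : (2 : Int) ^ i.toNat ≤ j ^ i.toNat := pow_le_pow_left₀ (by norm_num) h2j _
      omega

lemma isppRoot_spec (val : Int) (n : Nat) :
    ∀ (k : Nat) (lo hi : Int), (hi - lo).toNat = k → 1 ≤ lo → lo ≤ hi → val ≤ hi ^ n →
      (∀ x, 1 ≤ x → x < lo → x ^ n < val) →
      1 ≤ isppRoot val n lo hi ∧ isppRoot val n lo hi ≤ hi ∧
        val ≤ (isppRoot val n lo hi) ^ n ∧
        (∀ x, 1 ≤ x → x < isppRoot val n lo hi → x ^ n < val) := by
  intro k
  induction k using Nat.strong_induction_on with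
  | _ k IH =>
    intro lo hi hk hlo hle hhi hb
    rw [isppRoot]
    by_cases h : lo < hi
    · rw [dif_pos h]
      obtain ⟨hm1, hm2⟩ := PySem.Int.floordiv_two_mid_bounds (le_of_lt h)
      have hmlt : PySem.Int.floordiv (lo + hi) 2 < hi :=
        (PySem.Int.floordiv_lt_iff_lt_mul (by norm_num)).mpr (by omega)
      by_cases hc : (PySem.Int.floordiv (lo + hi) 2) ^ n < val
      · rw [if_pos hc]
        refine IH ((hi - (PySem.Int.floordiv (lo + hi) 2 + 1)).toNat) (by omega) _ _ rfl
          (by omega) (by omega) hhi ?_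
        intro x hx hxlt
        by_cases hxl : x < lo
        · exact hb x hx hxl
        · have : x ^ n ≤ (PySem.Int.floordiv (lo + hi) 2) ^ n :=
            pow_le_pow_left₀ (by omega) (by omega) n
          omega
      · rw [if_neg hc]
        push Not at hc
        obtain ⟨ha, hb2, hc2, hd⟩ := IH ((PySem.Int.floordiv (lo + hi) 2 - lo).toNat)
          (by omega) _ _ rfl hlo (by omega) hc hb
        exact ⟨ha, le_trans hb2 (le_of_lt hmlt), hc2, hd⟩
    · rw [dif_neg h]
      have : lo = hi := by omega
      subst this
      exact ⟨hlo, le_rfl, hhi, hb⟩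

lemma sorted_singleton (l : List Int) (r : Int) (hp : l.Pairwise (· < ·)) (hr : r ∈ l)
    (hall : ∀ x ∈ l, x = r) : l = [r] := by
  match l, hp with
  | [], _ => cases hr
  | [a], _ => simp_all
  | a :: b :: t, hp =>
    have ha := hall a (by simp)
    have hb := hall b (by simp)
    have := List.rel_of_pairwise_cons hp (by simp : b ∈ b :: t)
    omega

lemma isppF_eq_branch (val : Int) (i : Nat) (h2 : 2 ≤ i) (hle : (2 : Int) ^ i ≤ val) :
    isppF val (i : Int)
      = (if (isppRoot val i 1 val) ^ i = val then [[isppRoot val i 1 val, (i : Int)]] else []) := by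
  have h4 : 4 ≤ val := by
    have : (2 : Int) ^ 2 ≤ 2 ^ i := pow_le_pow_right₀ (by norm_num) h2
    norm_num at this; omega
  have hself : val ≤ val ^ i := le_self_pow₀ (by omega) (by omega)
  obtain ⟨hr1, hr2, hr3, hr4⟩ := isppRoot_spec val i ((val - 1).toNat) 1 val rfl le_rfl
    (by omega) hself (fun x hx hxlt => by omega)
  set r := isppRoot val i 1 val with hrdef
  have htn : ((i : Int)).toNat = i := by omega
  by_cases hr : r ^ i = val
  · rw [if_pos hr]
    have hrval : r < val := by
      rcases lt_or_eq_of_le hr2 with h | h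
      · exact h
      · exfalso
        have : val ^ 2 ≤ val ^ i := pow_le_pow_right₀ (by omega) h2
        have hv2 : val < val ^ 2 := by nlinarith
        rw [h] at hr; omega
    unfold isppF
    have hfil : (PySem.List.pyRange 1 val 1).filter
        (fun j => decide (j ^ ((i : Int)).toNat = val)) = [r] := by
      apply sorted_singleton _ r
      · exact List.Pairwise.filter _ (PySem.List.pairwise_lt_pyRange_one 1 val)
      · rw [List.mem_filter]
        exact ⟨(PySem.List.mem_pyRange_one).mpr ⟨hr1, hrval⟩, by simp [htn, hr]⟩
      · intro x hx
        rw [List.mem_filter] at hx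
        obtain ⟨hxr, hxp⟩ := hx
        have hxb := (PySem.List.mem_pyRange_one).mp hxr
        simp only [htn, decide_eq_true_eq] at hxp
        by_contra hne
        rcases lt_or_gt_of_ne hne with hlt | hgt
        · have := hr4 x (by omega) hlt; omega
        · have : r ^ i < x ^ i := pow_lt_pow_left₀ hgt (by omega) (by omega)
          omega
    rw [hfil]; rfl
  · rw [if_neg hr]
    unfold isppF
    rw [List.filter_eq_nil_iff.mpr, List.map_nil]
    intro j hj
    have hjb := (PySem.List.mem_pyRange_one).mp hj
    simp only [htn, decide_eq_true_eq]
    intro hpow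
    rcases lt_trichotomy j r with hlt | heq | hgt
    · have := hr4 j (by omega) hlt; omega
    · exact hr (heq ▸ hpow)
    · have : r ^ i < j ^ i := pow_lt_pow_left₀ hgt (by omega) (by omega)
      omega

lemma isppGo_eq (val : Int) :
    ∀ (k : Nat) (i : Nat), (val + 1 - 2 ^ i).toNat = k → 2 ≤ i →
      isppGo val i = (PySem.List.pyRange (i : Int) val 1).flatMap (isppF val) := by
  intro k
  induction k using Nat.strong_induction_on with
  | _ k IH =>
    intro i hk h2
    rw [isppGo]
    by_cases h : (2 : Int) ^ i ≤ val
    · rw [dif_pos h]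
      have hp : (0 : Int) < 2 ^ i := by positivity
      have hiv : (i : Int) < val := by
        have h1 : (i : Nat) < 2 ^ i := Nat.lt_two_pow_self
        have : ((i : Nat) : Int) < ((2 ^ i : Nat) : Int) := by exact_mod_cast h1
        push_cast at this
        omega
      rw [PySem.List.pyRange_one_cons hiv, List.flatMap_cons]
      have hnext : (2 : Int) ^ (i + 1) = 2 * 2 ^ i := by ring
      have hcast : ((i : Int) + 1) = ((i + 1 : Nat) : Int) := by push_cast; ring
      rw [hcast, IH ((val + 1 - 2 ^ (i + 1)).toNat) (by omega) (i + 1) rfl (by omega)]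
      rw [isppF_eq_branch val i h2 h]
    · rw [dif_neg h]
      symm
      rw [List.flatMap_eq_nil_iff]
      intro x hx
      have hxb := (PySem.List.mem_pyRange_one).mp hx
      apply isppF_eq_nil val x (by omega)
      rintro ⟨hx2, hxle⟩
      have : (2 : Int) ^ i ≤ 2 ^ x.toNat := pow_le_pow_right₀ (by norm_num) (by omega)
      omega

-- ===== VERDICT (by name: the statement is the Claim_ definition above) =====
theorem ispp_spec : Claim_equal_ispp := by
  intro val _
  unfold Spec_ispp ispp_alt
  rw [ispp_eq_flatMap, isppGo_eq val _ 2 rfl (by norm_num)]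
  norm_num
  by_cases hv : val ≤ 1
  · rw [PySem.List.pyRange_one_eq_nil hv, PySem.List.pyRange_one_eq_nil (by omega)]
  · rw [PySem.List.pyRange_one_append 1 2 val (by norm_num) (by omega),
      List.flatMap_append]
    have h1 : PySem.List.pyRange 1 2 1 = [1] := by decide
    rw [h1]
    simp [isppF_eq_nil val 1 le_rfl (by omega)]
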